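-- pv_equiv track=rewrite | github.com/yswcyswc/robot-coverage-study | visualizer.py | compute_frontier
-- ===== SOURCE A (Python) =====
-- def compute_frontier(rows, cols, grid, visited):
--     frontier = set()
--     directions = [(0, 1), (1, 0), (0, -1), (-1, 0)]
--
--     for row, col in visited:
--         for dr, dc in directions:
--             nr = row + dr
--             nc = col + dc
--             if 0 <= nr < rows and 0 <= nc < cols:
--                 if grid[nr][nc] == "." and (nr, nc) not in visited:
--                     frontier.add((nr, nc))
--
--     return frontier
-- ===== SOURCE B (Python) =====
-- def compute_frontier(rows, cols, grid, visited):
--     open_cells = {(r, c)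
--                   for r, row in enumerate(grid) if r < rows
--                   for c, ch in enumerate(row) if c < cols and ch == "."}
--     neighbours = dict.fromkeys((r + dr, c + dc)
--                                for r, c in visited
--                                for dr, dc in ((0, 1), (1, 0), (0, -1), (-1, 0)))
--     return {q for q in neighbours if q in open_cells} - set(visited)
-- ===== Notes on version B (the rewrite author's own statement) =====
-- stated objective: alternative
-- what changed: B reverses the data flow: it scans the grid once to precompute the set of in-bounds open cells, dedups the neighbour candidates up front with dict.fromkeys, and then obtains the frontier by one membership filter and a final set difference, instead of A's nested expand-and-test loop that indexes the grid and scans the visited collection per candidate.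
import Mathlib
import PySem

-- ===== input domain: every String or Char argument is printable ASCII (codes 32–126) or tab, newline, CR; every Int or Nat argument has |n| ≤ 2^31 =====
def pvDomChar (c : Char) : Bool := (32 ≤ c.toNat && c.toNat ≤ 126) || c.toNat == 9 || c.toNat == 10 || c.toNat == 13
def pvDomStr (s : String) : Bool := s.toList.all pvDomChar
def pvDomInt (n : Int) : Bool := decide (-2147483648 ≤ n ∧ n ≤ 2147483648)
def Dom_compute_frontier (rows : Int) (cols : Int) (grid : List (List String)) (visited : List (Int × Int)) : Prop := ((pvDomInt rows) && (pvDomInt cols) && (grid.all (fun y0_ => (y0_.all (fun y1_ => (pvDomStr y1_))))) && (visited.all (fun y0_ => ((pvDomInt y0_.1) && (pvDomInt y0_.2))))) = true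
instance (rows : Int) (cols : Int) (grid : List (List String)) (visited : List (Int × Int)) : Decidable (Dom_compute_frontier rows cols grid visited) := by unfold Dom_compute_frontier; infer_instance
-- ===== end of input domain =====

-- B inverts the data flow: it scans the GRID once to precompute the set of in-bounds open
-- cells, dedups the neighbour candidates first (dict.fromkeys), and finishes with set
-- filtering/difference, instead of A's nested expand-and-test loop that indexes the grid and
-- scans the visited list per candidate; return value only (neither program mutates arguments).

-- directions = [(0, 1), (1, 0), (0, -1), (-1, 0)]  (literal of A) / ((0,1),(1,0),(0,-1),(-1,0)) (of B)
def pvDirs : List (Int × Int) := [(0, 1), (1, 0), (0, -1), (-1, 0)]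

-- grid[nr][nc] for indices A only touches after its bounds check; the .getD defaults are
-- never reached under Pre_compute_frontier (exact there).
def pvCell (grid : List (List String)) (nr nc : Int) : String :=
  PySem.List.pyGetD ((PySem.List.pyGet? grid nr).getD []) nc ""

-- ===== PORT A =====
def compute_frontier (rows : Int) (cols : Int) (grid : List (List String)) (visited : List (Int × Int)) : List (Int × Int) :=
  visited.foldl (fun frontier p =>
    pvDirs.foldl (fun frontier d =>
      let nr := p.1 + d.1
      let nc := p.2 + d.2
      if 0 ≤ nr ∧ nr < rows ∧ 0 ≤ nc ∧ nc < cols then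
        if pvCell grid nr nc = "." ∧ ¬ (nr, nc) ∈ visited then
          PySem.Set.add frontier (nr, nc)
        else frontier
      else frontier) frontier) PySem.Set.empty

-- ===== PORT B =====
-- the open-cell set comprehension of Source B, as a list in comprehension order
def pvOpenList (rows cols : Int) (grid : List (List String)) : List (Int × Int) :=
  (PySem.List.enumerate grid).flatMap (fun rr =>
    if rr.1 < rows then
      ((PySem.List.enumerate rr.2).filter (fun cc => decide (cc.1 < cols ∧ cc.2 = "."))).map
        (fun cc => (rr.1, cc.1))
    else [])

def compute_frontier_alt (rows : Int) (cols : Int) (grid : List (List String)) (visited : List (Int × Int)) : List (Int × Int) :=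
  let open_cells : PySem.Set (Int × Int) := PySem.Set.ofList (pvOpenList rows cols grid)
  let neighbours : List (Int × Int) :=   -- dict.fromkeys(...) : ordered dedup of the candidates
    PySem.List.dedup (visited.flatMap (fun p => pvDirs.map (fun d => (p.1 + d.1, p.2 + d.2))))
  PySem.Set.diff
    (PySem.Set.ofList (neighbours.filter (fun q => PySem.Set.contains open_cells q)))
    (PySem.Set.ofList visited)

-- ===== PRECONDITION & SPEC =====
-- Pre_ excludes exactly the inputs on which Python A raises an IndexError: some in-bounds
-- (w.r.t. rows/cols) neighbour of a visited cell lies outside the actual grid data.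
def Pre_compute_frontier (rows : Int) (cols : Int) (grid : List (List String)) (visited : List (Int × Int)) : Prop :=
  ∀ p ∈ visited, ∀ d ∈ pvDirs,
    (0 ≤ p.1 + d.1 ∧ p.1 + d.1 < rows ∧ 0 ≤ p.2 + d.2 ∧ p.2 + d.2 < cols) →
    ((p.1 + d.1).toNat < grid.length ∧
      (p.2 + d.2).toNat < (grid.getD (p.1 + d.1).toNat []).length)
instance (rows : Int) (cols : Int) (grid : List (List String)) (visited : List (Int × Int)) : Decidable (Pre_compute_frontier rows cols grid visited) := by unfold Pre_compute_frontier; infer_instance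

def pvWitness_compute_frontier : Int × Int × List (List String) × (List (Int × Int)) :=
  (2, 2, [[".", "."], [".", "#"]], [(0, 0)])

def Spec_compute_frontier (rows : Int) (cols : Int) (grid : List (List String)) (visited : List (Int × Int)) (out : List (Int × Int)) : Prop := out = compute_frontier_alt rows cols grid visited
instance (rows : Int) (cols : Int) (grid : List (List String)) (visited : List (Int × Int)) (out : List (Int × Int)) : Decidable (Spec_compute_frontier rows cols grid visited out) := by unfold Spec_compute_frontier; infer_instance

-- ===== CLAIM (what is proved, stated in full; the proofs are below) =====
def Claim_equal_compute_frontier : Prop := ∀ (rows : Int) (cols : Int) (grid : List (List String)) (visited : List (Int × Int)), Dom_compute_frontier rows cols grid visited → Pre_compute_frontier rows cols grid visited → Spec_compute_frontier rows cols grid visited (compute_frontier rows cols grid visited)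

-- ===== LEMMAS AND PROOFS =====

-- folding Set.add over a filtered list = the original fold that adds only when the predicate holds
theorem pv_foldl_add_filter {α : Type} [BEq α] (p : α → Bool) (l : List α) (s : PySem.Set α) :
    (l.filter p).foldl PySem.Set.add s
      = l.foldl (fun s x => if p x then PySem.Set.add s x else s) s := by
  induction l generalizing s with
  | nil => rfl
  | cons a t ih =>
    by_cases h : p a <;> simp [h, ih]

-- folding over a flatMap = nested fold
theorem pv_foldl_flatMap {α β γ : Type} (g : α → List β) (f : γ → β → γ) (l : List α) (s : γ) :
    (l.flatMap g).foldl f s = l.foldl (fun s x => (g x).foldl f s) s := by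
  induction l generalizing s with
  | nil => rfl
  | cons a t ih => simp [List.flatMap_cons, List.foldl_append, ih]

-- Set.ofList commutes with filtering (dedup keeps first occurrences, so a pointwise
-- predicate may be applied before or after)
theorem pv_filter_ofList {α : Type} [BEq α] [LawfulBEq α] (p : α → Bool) (l : List α) :
    (PySem.Set.ofList l).filter p = PySem.Set.ofList (l.filter p) := by
  induction l using List.reverseRecOn with
  | nil => rfl
  | append_singleton l x ih =>
    rw [PySem.Set.ofList_append_singleton, List.filter_append, PySem.Set.add_eq_ite]
    by_cases hp : p x
    · have hfx : List.filter p [x] = [x] := by simp [hp]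
      rw [hfx]
      by_cases hx : x ∈ l
      · rw [if_pos ((PySem.Set.mem_ofList _ _).2 hx), ih, PySem.Set.ofList_append_singleton,
          PySem.Set.add_eq_ite,
          if_pos ((PySem.Set.mem_ofList _ _).2 (List.mem_filter.2 ⟨hx, hp⟩))]
      · rw [if_neg (fun h => hx ((PySem.Set.mem_ofList _ _).1 h)), List.filter_append, hfx, ih,
          PySem.Set.ofList_append_singleton, PySem.Set.add_eq_ite,
          if_neg (fun h => hx (List.mem_of_mem_filter ((PySem.Set.mem_ofList _ _).1 h)))]
    · have hfx : List.filter p [x] = [] := by simp [hp]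
      rw [hfx, List.append_nil]
      by_cases hx : x ∈ l
      · rw [if_pos ((PySem.Set.mem_ofList _ _).2 hx), ih]
      · rw [if_neg (fun h => hx ((PySem.Set.mem_ofList _ _).1 h)), List.filter_append, hfx,
          List.append_nil, ih]

-- membership in Source B's open-cell list, for a cell whose grid row/col are present whenever
-- it is in bounds (what Pre_ guarantees about every candidate)
theorem pv_mem_openList (rows cols : Int) (grid : List (List String)) (q : Int × Int)
    (Hq : (0 ≤ q.1 ∧ q.1 < rows ∧ 0 ≤ q.2 ∧ q.2 < cols) →
      (q.1.toNat < grid.length ∧ q.2.toNat < (grid.getD q.1.toNat []).length)) :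
    (q ∈ pvOpenList rows cols grid) ↔
      ((0 ≤ q.1 ∧ q.1 < rows ∧ 0 ≤ q.2 ∧ q.2 < cols) ∧ pvCell grid q.1 q.2 = ".") := by
  unfold pvOpenList
  constructor
  · intro h
    rcases List.mem_flatMap.1 h with ⟨rr, hrr, hq⟩
    rcases (PySem.List.mem_enumerate_iff _ _ _).1 hrr with ⟨k, hk, rfl⟩
    by_cases hrows : ((0 : Int) + k, grid[k]).1 < rows
    · rw [if_pos hrows] at hq
      rcases List.mem_map.1 hq with ⟨cc, hcc, rfl⟩
      rcases List.mem_filter.1 hcc with ⟨hcc', hcond⟩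
      rcases (PySem.List.mem_enumerate_iff _ _ _).1 hcc' with ⟨j, hj, rfl⟩
      simp only [decide_eq_true_eq] at hcond
      simp only [zero_add] at *
      refine ⟨⟨by positivity, hrows, by positivity, hcond.1⟩, ?_⟩
      simp only [pvCell, PySem.List.pyGet?_natCast, List.getElem?_eq_getElem hk,
        Option.getD_some, PySem.List.pyGetD_natCast, List.getD_eq_getElem _ _ hj]
      exact hcond.2
    · rw [if_neg hrows] at hq
      exact absurd hq (List.not_mem_nil)
  · rintro ⟨hb, hc⟩
    rcases Hq hb with ⟨hk, hj⟩
    have h1 : ((q.1.toNat : Int)) = q.1 := Int.toNat_of_nonneg hb.1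
    have h2 : ((q.2.toNat : Int)) = q.2 := Int.toNat_of_nonneg hb.2.2.1
    have hrowD : grid.getD q.1.toNat [] = grid[q.1.toNat] := List.getD_eq_getElem _ _ hk
    have hj' : q.2.toNat < grid[q.1.toNat].length := by rw [← hrowD]; exact hj
    have hcell : pvCell grid q.1 q.2 = (grid[q.1.toNat])[q.2.toNat] := by
      unfold pvCell
      rw [PySem.List.pyGet?_of_nonneg _ hb.1, List.getElem?_eq_getElem hk, Option.getD_some,
        PySem.List.pyGetD_eq_getElem _ _ hb.2.2.1 (by exact_mod_cast Int.lt_of_toNat_lt (by omega))]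
    refine List.mem_flatMap.2 ⟨(q.1, grid[q.1.toNat]), ?_, ?_⟩
    · exact (PySem.List.mem_enumerate_iff _ _ _).2 ⟨q.1.toNat, hk, by rw [zero_add, h1]⟩
    · rw [if_pos hb.2.1]
      refine List.mem_map.2 ⟨(q.2, (grid[q.1.toNat])[q.2.toNat]), ?_, rfl⟩
      refine List.mem_filter.2 ⟨?_, ?_⟩
      · exact (PySem.List.mem_enumerate_iff _ _ _).2 ⟨q.2.toNat, hj', by rw [zero_add, h2]⟩
      · simp only [decide_eq_true_eq]
        exact ⟨hb.2.2.2, by rw [← hcell]; exact hc⟩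

theorem compute_frontier_eq_alt (rows cols : Int) (grid : List (List String)) (visited : List (Int × Int))
    (hpre : Pre_compute_frontier rows cols grid visited) :
    compute_frontier rows cols grid visited = compute_frontier_alt rows cols grid visited := by
  -- the flat candidate list, in A's traversal order
  set cand : List (Int × Int) :=
    visited.flatMap (fun p => pvDirs.map (fun d => (p.1 + d.1, p.2 + d.2))) with hcand
  -- A = ofList (cand filtered by A's full test)
  have hA : compute_frontier rows cols grid visited
      = PySem.Set.ofList (cand.filter (fun q =>
          decide ((0 ≤ q.1 ∧ q.1 < rows ∧ 0 ≤ q.2 ∧ q.2 < cols) ∧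
            pvCell grid q.1 q.2 = "." ∧ ¬ q ∈ visited))) := by
    rw [PySem.Set.ofList_eq_foldl, pv_foldl_add_filter, hcand, pv_foldl_flatMap]
    unfold compute_frontier
    congr 1
    funext s p
    rw [List.foldl_map]
    congr 1
    funext s d
    by_cases hb : 0 ≤ p.1 + d.1 ∧ p.1 + d.1 < rows ∧ 0 ≤ p.2 + d.2 ∧ p.2 + d.2 < cols
    · by_cases hc : pvCell grid (p.1 + d.1) (p.2 + d.2) = "." ∧ ¬ (p.1 + d.1, p.2 + d.2) ∈ visited
      · simp [hb, hc.1, hc.2]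
      · rw [if_pos hb, if_neg hc]
        simp only [decide_eq_true_eq]
        rw [if_neg (fun h => hc h.2)]
    · simp [hb]
  -- B = ofList (cand filtered by membership in the open set and non-membership in visited)
  have hB : compute_frontier_alt rows cols grid visited
      = PySem.Set.ofList (cand.filter (fun q =>
          (PySem.Set.contains (PySem.Set.ofList (pvOpenList rows cols grid)) q &&
            !(PySem.Set.ofList visited).contains q))) := by
    unfold compute_frontier_alt
    simp only [PySem.List.dedup_eq_ofList, ← hcand]
    have hdiff : ∀ (s t : PySem.Set (Int × Int)),
        PySem.Set.diff s t = s.filter (fun x => !t.contains x) := fun _ _ => rfl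
    rw [hdiff, PySem.Set.ofList_eq_self_of_nodup _
        (List.Nodup.filter _ (PySem.Set.nodup_ofList cand)),
      pv_filter_ofList, pv_filter_ofList, List.filter_filter]
    congr 1
    exact List.filter_congr fun q _ => Bool.and_comm _ _
  rw [hA, hB]
  congr 1
  refine List.filter_congr ?_
  intro q hq
  -- q is a candidate: Pre_ gives it a grid row/column whenever it is in bounds
  have hqpre : (0 ≤ q.1 ∧ q.1 < rows ∧ 0 ≤ q.2 ∧ q.2 < cols) →
      (q.1.toNat < grid.length ∧ q.2.toNat < (grid.getD q.1.toNat []).length) := by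
    rcases List.mem_flatMap.1 hq with ⟨p, hp, hq'⟩
    rcases List.mem_map.1 hq' with ⟨d, hd, rfl⟩
    exact hpre p hp d hd
  have hopen := pv_mem_openList rows cols grid q hqpre
  have hcont : PySem.Set.contains (PySem.Set.ofList (pvOpenList rows cols grid)) q
      = decide ((0 ≤ q.1 ∧ q.1 < rows ∧ 0 ≤ q.2 ∧ q.2 < cols) ∧ pvCell grid q.1 q.2 = ".") := by
    by_cases h : (0 ≤ q.1 ∧ q.1 < rows ∧ 0 ≤ q.2 ∧ q.2 < cols) ∧ pvCell grid q.1 q.2 = "."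
    · rw [decide_eq_true h]
      exact (PySem.Set.contains_iff _ _).2 ((PySem.Set.mem_ofList _ _).2 (hopen.2 h))
    · simp only [h, decide_false]
      by_contra hcon
      exact h (hopen.1 ((PySem.Set.mem_ofList _ _).1 ((PySem.Set.contains_iff _ _).1
        (by revert hcon; cases PySem.Set.contains (PySem.Set.ofList (pvOpenList rows cols grid)) q <;> simp))))
  rw [hcont]
  have hvis : ((PySem.Set.ofList visited).contains q : Bool) = decide (q ∈ visited) := by
    by_cases h : q ∈ visited
    · simp only [h, decide_true]
      exact (PySem.Set.contains_iff _ _).2 ((PySem.Set.mem_ofList _ _).2 h)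
    · simp only [h, decide_false]
      by_contra hcon
      exact h ((PySem.Set.mem_ofList _ _).1 ((PySem.Set.contains_iff _ _).1
        (by revert hcon; cases ((PySem.Set.ofList visited).contains q : Bool) <;> simp)))
  rw [hvis]
  by_cases h1 : (0 ≤ q.1 ∧ q.1 < rows ∧ 0 ≤ q.2 ∧ q.2 < cols)
    <;> by_cases h2 : pvCell grid q.1 q.2 = "."
    <;> by_cases h3 : q ∈ visited <;> simp [h1, h2, h3]

-- ===== VERDICT (by name: the statement is the Claim_ definition above) =====
theorem compute_frontier_spec : Claim_equal_compute_frontier := by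
  intro rows cols grid visited _ hpre
  exact compute_frontier_eq_alt rows cols grid visited hpre
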